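-- pv_equiv track=rewrite | github.com/tomerfri12/gtm-db | scripts/import_funnel.py | _build_channel_product_rows
-- ===== SOURCE A (Python) =====
-- from typing import Any
--
-- def _product_stored_name(csv_product_name: str) -> str:
--     name = csv_product_name.strip()
--     return name.upper() if len(name) <= 8 else name.title()
--
-- def _channel_type(channel_name: str) -> str:
--     n = channel_name.upper()
--     if n in (
--         "SEM",
--         "YOUTUBE",
--         "FACEBOOK",
--         "LINKEDIN",
--         "MB_PUSH",
--         "MB_PULL",
--         "DSPS_DISPLAY",
--         "DSPS_VIDEO",
--     ):
--         return "paid"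
--     if n in ("ORGANIC_SEO", "BRANDED_SEARCH"):
--         return "organic"
--     if n.startswith("MB_") or n == "MB":
--         return "marketplace"
--     return "other"
--
-- def _s(v: str | None) -> str | None:
--     if v is None:
--         return None
--     t = v.strip()
--     return t if t else None
--
-- def _build_channel_product_rows(
--     monday: list[dict[str, str | None]], q1: list[dict[str, str]]
-- ) -> tuple[list[dict[str, Any]], list[dict[str, Any]]]:
--     chans: dict[str, str] = {}
--     for r in monday:
--         n = _s(r.get("grouped_channel"))
--         if n:
--             chans[n] = _channel_type(n)
--     for r in q1:
--         n = _s(r.get("GROUPED_CHANNEL"))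
--         if n:
--             chans[n] = _channel_type(n)
--     channel_rows = [{"name": k, "channel_type": v} for k, v in sorted(chans.items())]
--
--     products: set[str] = set()
--     for r in monday:
--         p = _s(r.get("product"))
--         if p:
--             products.add(_product_stored_name(p))
--     product_rows = [{"name": n, "status": "active"} for n in sorted(products)]
--     return channel_rows, product_rows
-- ===== SOURCE B (Python) =====
-- def _product_stored_name(csv_product_name: str) -> str:
--     name = csv_product_name.strip()
--     return name.upper() if len(name) <= 8 else name.title()
--
--
-- def _channel_type(channel_name: str) -> str:
--     n = channel_name.upper()
--     if n in (
--         "SEM",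
--         "YOUTUBE",
--         "FACEBOOK",
--         "LINKEDIN",
--         "MB_PUSH",
--         "MB_PULL",
--         "DSPS_DISPLAY",
--         "DSPS_VIDEO",
--     ):
--         return "paid"
--     if n in ("ORGANIC_SEO", "BRANDED_SEARCH"):
--         return "organic"
--     if n.startswith("MB_") or n == "MB":
--         return "marketplace"
--     return "other"
--
--
-- def _s(v):
--     if v is None:
--         return None
--     t = v.strip()
--     return t if t else None
--
--
-- def _build_channel_product_rows(monday, q1):
--     # sort-then-adjacent-dedup instead of hash-based dedup-then-sort
--     names = []
--     for r in monday:
--         n = _s(r.get("grouped_channel"))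
--         if n:
--             names.append(n)
--     for r in q1:
--         n = _s(r.get("GROUPED_CHANNEL"))
--         if n:
--             names.append(n)
--     names.sort()
--     channel_rows = []
--     prev = None
--     for n in names:
--         if n != prev:
--             channel_rows.append({"name": n, "channel_type": _channel_type(n)})
--             prev = n
--
--     pnames = []
--     for r in monday:
--         p = _s(r.get("product"))
--         if p:
--             pnames.append(_product_stored_name(p))
--     pnames.sort()
--     product_rows = []
--     prev = None
--     for p in pnames:
--         if p != prev:
--             product_rows.append({"name": p, "status": "active"})
--             prev = p
--     return channel_rows, product_rows
-- ===== Notes on version B (the rewrite author's own statement) =====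
-- stated objective: alternative
-- what changed: Replaces the hash-based dedup (dict of channel name -> type, set of product names) followed by sorting with collecting flat lists of names, sorting them, and emitting rows in one linear pass that skips adjacent duplicates by tracking the previously emitted name.
import Mathlib
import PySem

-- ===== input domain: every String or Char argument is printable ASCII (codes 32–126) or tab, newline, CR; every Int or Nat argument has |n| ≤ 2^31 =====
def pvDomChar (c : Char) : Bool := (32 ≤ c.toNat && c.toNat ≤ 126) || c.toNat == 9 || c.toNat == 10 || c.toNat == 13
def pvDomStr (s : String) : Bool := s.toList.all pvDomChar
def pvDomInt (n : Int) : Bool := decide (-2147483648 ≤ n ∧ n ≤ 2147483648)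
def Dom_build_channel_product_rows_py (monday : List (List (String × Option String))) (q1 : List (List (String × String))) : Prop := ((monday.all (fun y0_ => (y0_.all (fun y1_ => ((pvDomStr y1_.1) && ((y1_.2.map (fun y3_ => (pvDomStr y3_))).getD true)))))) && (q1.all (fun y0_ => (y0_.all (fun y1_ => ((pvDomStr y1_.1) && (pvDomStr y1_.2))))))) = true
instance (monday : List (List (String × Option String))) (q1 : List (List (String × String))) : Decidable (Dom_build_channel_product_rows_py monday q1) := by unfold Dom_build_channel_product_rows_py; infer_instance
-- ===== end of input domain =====

-- B replaces A's hash-based dedup (dict / set built first, then sorted) by collecting flat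
-- name lists, sorting them, and one linear pass that skips adjacent duplicates (alternative).

-- ===== PORT A =====
-- shared module helpers (_s, _channel_type, _product_stored_name), used by both Pythons

-- r.get(k) on a row whose values are str|None: missing key and stored None both give None
def pvGetM (r : List (String × Option String)) (k : String) : Option String :=
  ((PySem.Dict.mk r).get? k).getD none

-- r.get(k) on a str-valued row: missing key gives None
def pvGetQ (r : List (String × String)) (k : String) : Option String :=
  (PySem.Dict.mk r).get? k

-- _s : strip, empty string becomes None ('t if t else None')
def pvS (v : Option String) : Option String :=
  match v with
  | none => none
  | some s =>
      let t := PySem.Str.strip s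
      if t = "" then none else some t

-- str.title(), hand-ported over List Char: a letter is uppercased after a non-letter,
-- lowercased after a letter (exact for the printable-ASCII domain, where cased = alpha)
def pvTitleAux : Bool → List Char → List Char
  | _, [] => []
  | prevAlpha, c :: cs =>
      (if PySem.Chars.isalpha c then
        (if prevAlpha then PySem.Chars.lowerChar c else PySem.Chars.upperChar c)
      else c) :: pvTitleAux (PySem.Chars.isalpha c) cs

def pvTitle (s : String) : String := String.ofList (pvTitleAux false s.toList)

-- _product_stored_name
def pvProductStoredName (csv_product_name : String) : String :=
  let name := PySem.Str.strip csv_product_name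
  if PySem.Str.len name ≤ 8 then PySem.Str.upper name else pvTitle name

-- _channel_type
def pvChannelType (channel_name : String) : String :=
  let n := PySem.Str.upper channel_name
  if n ∈ ["SEM", "YOUTUBE", "FACEBOOK", "LINKEDIN", "MB_PUSH", "MB_PULL", "DSPS_DISPLAY", "DSPS_VIDEO"] then "paid"
  else if n ∈ ["ORGANIC_SEO", "BRANDED_SEARCH"] then "organic"
  else if PySem.Str.startswith n "MB_" || n == "MB" then "marketplace"
  else "other"

def build_channel_product_rows_py (monday : List (List (String × Option String))) (q1 : List (List (String × String))) : (List (List (String × String))) × (List (List (String × String))) :=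
  let chans : PySem.Dict String String :=
    monday.foldl (fun d r =>
      match pvS (pvGetM r "grouped_channel") with
      | some n => d.insert n (pvChannelType n)
      | none => d) PySem.Dict.empty
  let chans :=
    q1.foldl (fun d r =>
      match pvS (pvGetQ r "GROUPED_CHANNEL") with
      | some n => d.insert n (pvChannelType n)
      | none => d) chans
  let channel_rows :=
    (PySem.List.sorted2 chans.items (fun kv => kv.1) (fun kv => kv.2)).map
      (fun kv => [("name", kv.1), ("channel_type", kv.2)])
  let products : PySem.Set String :=
    monday.foldl (fun s r =>
      match pvS (pvGetM r "product") with
      | some p => PySem.Set.add s (pvProductStoredName p)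
      | none => s) PySem.Set.empty
  let product_rows :=
    (PySem.List.sorted products (fun x => x)).map (fun n => [("name", n), ("status", "active")])
  (channel_rows, product_rows)

-- ===== PORT B =====
def build_channel_product_rows_py_alt (monday : List (List (String × Option String))) (q1 : List (List (String × String))) : (List (List (String × String))) × (List (List (String × String))) :=
  let names : List String :=
    monday.foldl (fun acc r =>
      match pvS (pvGetM r "grouped_channel") with
      | some n => acc ++ [n]
      | none => acc) []
  let names :=
    q1.foldl (fun acc r =>
      match pvS (pvGetQ r "GROUPED_CHANNEL") with
      | some n => acc ++ [n]
      | none => acc) names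
  let names := PySem.List.sorted names (fun x => x)
  let channel_rows :=
    (names.foldl (fun (st : List (List (String × String)) × Option String) n =>
      if some n ≠ st.2 then (st.1 ++ [[("name", n), ("channel_type", pvChannelType n)]], some n) else st)
      ([], none)).1
  let pnames : List String :=
    monday.foldl (fun acc r =>
      match pvS (pvGetM r "product") with
      | some p => acc ++ [pvProductStoredName p]
      | none => acc) []
  let pnames := PySem.List.sorted pnames (fun x => x)
  let product_rows :=
    (pnames.foldl (fun (st : List (List (String × String)) × Option String) p =>
      if some p ≠ st.2 then (st.1 ++ [[("name", p), ("status", "active")]], some p) else st)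
      ([], none)).1
  (channel_rows, product_rows)

-- ===== PRECONDITION & SPEC =====
def Spec_build_channel_product_rows_py (monday : List (List (String × Option String))) (q1 : List (List (String × String))) (out : (List (List (String × String))) × (List (List (String × String)))) : Prop := out = build_channel_product_rows_py_alt monday q1
instance (monday : List (List (String × Option String))) (q1 : List (List (String × String))) (out : (List (List (String × String))) × (List (List (String × String)))) : Decidable (Spec_build_channel_product_rows_py monday q1 out) := by unfold Spec_build_channel_product_rows_py; infer_instance

-- ===== CLAIM (what is proved, stated in full; the proofs are below) =====
def Claim_equal_build_channel_product_rows_py : Prop := ∀ (monday : List (List (String × Option String))) (q1 : List (List (String × String))), Dom_build_channel_product_rows_py monday q1 → Spec_build_channel_product_rows_py monday q1 (build_channel_product_rows_py monday q1)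

-- ===== LEMMAS AND PROOFS =====

-- a fold whose step appends a row-determined chunk, restarted from an arbitrary accumulator
theorem pv_append_fold {α β : Type} (step : List α → β → List α)
    (hstep : ∀ acc r, step acc r = acc ++ step [] r) (rows : List β) (acc : List α) :
    rows.foldl step acc = acc ++ rows.foldl step [] := by
  induction rows generalizing acc with
  | nil => simp
  | cons r rows ih =>
      simp only [List.foldl_cons]
      rw [ih (step acc r), ih (step [] r), hstep acc r]
      simp

-- a filtering/combining fold equals the plain fold of g over the collected chunks
theorem pv_fold_corr {α β δ : Type} (stepc : List α → β → List α) (stepg : δ → β → δ)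
    (g : δ → α → δ)
    (hc : ∀ acc r, stepc acc r = acc ++ stepc [] r)
    (hg : ∀ d r, stepg d r = (stepc [] r).foldl g d) (rows : List β) (d : δ) :
    rows.foldl stepg d = (rows.foldl stepc []).foldl g d := by
  induction rows generalizing d with
  | nil => simp
  | cons r rows ih =>
      simp only [List.foldl_cons]
      rw [ih (stepg d r), hg d r, pv_append_fold stepc hc rows (stepc [] r), List.foldl_append]

-- items of a dict built by inserting k ↦ f k over ns, starting from a dict of the same shape
theorem pv_items_fold_insert (f : String → String) (ns : List String) (S : List String) :
    (ns.foldl (fun d n => d.insert n (f n)) (PySem.Dict.mk (S.map (fun k => (k, f k))))).items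
      = (PySem.Set.update S ns).map (fun k => (k, f k)) := by
  induction ns generalizing S with
  | nil => simp [PySem.Set.update]
  | cons n ns ih =>
      simp only [List.foldl_cons]
      by_cases hmem : n ∈ S
      · have hc : (PySem.Dict.mk (S.map (fun k => (k, f k)))).contains n = true := by
          show (S.map (fun k => (k, f k))).any (fun p => p.1 == n) = true
          rw [List.any_eq_true]
          exact ⟨(n, f n), List.mem_map_of_mem hmem, by simp⟩
        have h1 : (PySem.Dict.mk (S.map (fun k => (k, f k)))).insert n (f n)
            = PySem.Dict.mk (S.map (fun k => (k, f k))) := by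
          simp only [PySem.Dict.insert, hc, if_true]
          congr 1
          show (S.map (fun k => (k, f k))).map (fun p => if p.1 == n then (n, f n) else p)
              = S.map (fun k => (k, f k))
          rw [List.map_map]
          apply List.map_congr_left
          intro k _
          simp only [Function.comp]
          by_cases hk : k = n
          · subst hk; simp
          · simp [beq_eq_false_iff_ne.mpr hk]
        have h2 : PySem.Set.add S n = S := by
          simp [PySem.Set.add, PySem.Set.contains, hmem]
        rw [h1, ih S]
        have h3 : PySem.Set.update S (n :: ns) = PySem.Set.update S ns := by
          simp [PySem.Set.update, h2]
        rw [h3]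
      · have hc : (PySem.Dict.mk (S.map (fun k => (k, f k)))).contains n = false := by
          show (S.map (fun k => (k, f k))).any (fun p => p.1 == n) = false
          rw [List.any_eq_false]
          intro p hp
          obtain ⟨k, hk, rfl⟩ := List.mem_map.mp hp
          exact fun he => hmem ((beq_iff_eq.mp he) ▸ hk)
        have h1 : (PySem.Dict.mk (S.map (fun k => (k, f k)))).insert n (f n)
            = PySem.Dict.mk ((S ++ [n]).map (fun k => (k, f k))) := by
          simp [PySem.Dict.insert, hc, List.map_append]
        have h2 : PySem.Set.add S n = S ++ [n] := by
          simp [PySem.Set.add, PySem.Set.contains, hmem]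
        rw [h1, ih (S ++ [n])]
        have h3 : PySem.Set.update S (n :: ns) = PySem.Set.update (S ++ [n]) ns := by
          simp [PySem.Set.update, h2]
        rw [h3]

-- insertBy commutes with map when the comparators agree through the map
theorem pv_insertBy_map {α β : Type} (g : α → β) (p : β → β → Bool) (q : α → α → Bool)
    (hpq : ∀ a b, p (g a) (g b) = q a b) (x : α) (ys : List α) :
    (PySem.List.insertBy q x ys).map g = PySem.List.insertBy p (g x) (ys.map g) := by
  induction ys with
  | nil => simp [PySem.List.insertBy]
  | cons y ys ih =>
      simp only [PySem.List.insertBy, List.map_cons, hpq x y]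
      by_cases h : q x y = true
      · simp [h]
      · simp [h, ih]

theorem pv_foldl_insertBy_map {α β : Type} (g : α → β) (p : β → β → Bool) (q : α → α → Bool)
    (hpq : ∀ a b, p (g a) (g b) = q a b) (xs acc : List α) :
    (xs.map g).foldl (fun acc x => PySem.List.insertBy p x acc) (acc.map g)
      = (xs.foldl (fun acc x => PySem.List.insertBy q x acc) acc).map g := by
  induction xs generalizing acc with
  | nil => simp
  | cons x xs ih =>
      simp only [List.map_cons, List.foldl_cons]
      rw [← pv_insertBy_map g p q hpq, ih]

-- the pair comparator of sorted2 on (k, f k) pairs is the key comparator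
theorem pv_pair_lt_eq (f : String → String) (a b : String) :
    (decide (a < b) || (!decide (b < a) && decide (f a < f b))) = decide (a < b) := by
  by_cases hab : a < b
  · simp [hab]
  · by_cases hba : b < a
    · simp [hab, hba]
    · have : a = b := le_antisymm (le_of_not_gt hba) (le_of_not_gt hab)
      subst this
      simp

-- sorted2 of the pair list is the map of sorted keys
theorem pv_sorted2_map_pair (f : String → String) (S : List String) :
    PySem.List.sorted2 (S.map (fun k => (k, f k))) (fun kv => kv.1) (fun kv => kv.2)
      = (PySem.List.sorted S (fun x => x)).map (fun k => (k, f k)) := by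
  rw [PySem.List.sorted_eq_foldl_insertBy]
  simp only [PySem.List.sorted2]
  have h := pv_foldl_insertBy_map (fun k : String => (k, f k))
    (fun a b : String × String => decide (a.1 < b.1) || (!decide (b.1 < a.1) && decide (a.2 < b.2)))
    (fun a b : String => decide (a < b))
    (fun a b => pv_pair_lt_eq f a b) S []
  simpa using h

-- B's adjacent-dedup pass, as a recursive function
def pvDedupAdj : Option String → List String → List String
  | _, [] => []
  | prev, n :: ns => if some n ≠ prev then n :: pvDedupAdj (some n) ns else pvDedupAdj prev ns

-- B's emit fold is the map of the adjacent dedup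
theorem pv_emit_eq (row : String → List (String × String)) (ys : List String)
    (prev : Option String) (acc : List (List (String × String))) :
    (ys.foldl (fun (st : List (List (String × String)) × Option String) n =>
        if some n ≠ st.2 then (st.1 ++ [row n], some n) else st) (acc, prev)).1
      = acc ++ (pvDedupAdj prev ys).map row := by
  induction ys generalizing prev acc with
  | nil => simp [pvDedupAdj]
  | cons n ys ih =>
      simp only [List.foldl_cons]
      by_cases h : some n ≠ prev
      · rw [if_pos h, ih]
        simp [pvDedupAdj, h]
      · rw [if_neg h, ih]
        simp [pvDedupAdj, h]

-- adjacent dedup of a ≤-sorted list: strictly sorted, members = members not equal to prev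
theorem pv_dedupAdj_spec (ys : List String) (prev : Option String)
    (hys : ys.Pairwise (· ≤ ·)) (hprev : ∀ p, prev = some p → ∀ y ∈ ys, p ≤ y) :
    (pvDedupAdj prev ys).Pairwise (· < ·)
      ∧ (∀ x, x ∈ pvDedupAdj prev ys ↔ x ∈ ys ∧ some x ≠ prev) := by
  induction ys generalizing prev with
  | nil => simp [pvDedupAdj]
  | cons n ns ih =>
      have hle : ∀ y ∈ ns, n ≤ y := (List.pairwise_cons.mp hys).1
      have hns : ns.Pairwise (· ≤ ·) := (List.pairwise_cons.mp hys).2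
      by_cases h : some n ≠ prev
      · obtain ⟨hpw, hmem⟩ := ih (some n) hns
          (by rintro p hp y hy; injection hp with h'; exact h' ▸ hle y hy)
        have heq : pvDedupAdj prev (n :: ns) = n :: pvDedupAdj (some n) ns := by
          simp only [pvDedupAdj]; rw [if_pos h]
        constructor
        · rw [heq]
          refine List.pairwise_cons.mpr ⟨?_, hpw⟩
          intro y hy
          obtain ⟨hyns, hyne⟩ := (hmem y).mp hy
          exact lt_of_le_of_ne (hle y hyns) (by intro he; exact hyne (by rw [he]))
        · intro x
          rw [heq, List.mem_cons, hmem x]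
          constructor
          · rintro (rfl | ⟨hx, _⟩)
            · exact ⟨List.mem_cons_self, h⟩
            · refine ⟨List.mem_cons_of_mem n hx, ?_⟩
              intro hp
              rcases prev with _ | p
              · simp at hp
              · have hxp : x = p := by injection hp
                have hpn : p ≤ n := hprev p rfl n List.mem_cons_self
                have hnx : n ≤ x := hle x hx
                exact h (congrArg some (le_antisymm hpn (hxp ▸ hnx)).symm)
          · rintro ⟨hx, hne⟩
            rcases List.mem_cons.mp hx with rfl | hx'
            · exact Or.inl rfl
            · by_cases hxn : x = n
              · exact Or.inl hxn
              · exact Or.inr ⟨hx', by simpa using hxn⟩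
      · have heqp : some n = prev := not_not.mp h
        obtain ⟨hpw, hmem⟩ := ih prev hns
          (by rintro p hp y hy
              rw [← heqp] at hp
              injection hp with h'
              exact h' ▸ hle y hy)
        have heq : pvDedupAdj prev (n :: ns) = pvDedupAdj prev ns := by
          simp only [pvDedupAdj]; rw [if_neg h]
        refine ⟨by rw [heq]; exact hpw, ?_⟩
        intro x
        rw [heq, hmem x]
        constructor
        · rintro ⟨hx, hne⟩
          exact ⟨List.mem_cons_of_mem n hx, hne⟩
        · rintro ⟨hx, hne⟩
          rcases List.mem_cons.mp hx with rfl | hx'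
          · exact absurd heqp hne
          · exact ⟨hx', hne⟩

-- two strictly increasing lists with the same members are equal
theorem pv_strict_sorted_ext (l1 l2 : List String) (h1 : l1.Pairwise (· < ·))
    (h2 : l2.Pairwise (· < ·)) (hm : ∀ x, x ∈ l1 ↔ x ∈ l2) : l1 = l2 := by
  induction l1 generalizing l2 with
  | nil =>
      cases l2 with
      | nil => rfl
      | cons b l2 => exact absurd ((hm b).mpr List.mem_cons_self) (by simp)
  | cons a l1 ih =>
      cases l2 with
      | nil => exact absurd ((hm a).mp List.mem_cons_self) (by simp)
      | cons b l2 =>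
          have h1' := List.pairwise_cons.mp h1
          have h2' := List.pairwise_cons.mp h2
          have hab : a = b := by
            rcases List.mem_cons.mp ((hm a).mp List.mem_cons_self) with h | h
            · exact h
            · rcases List.mem_cons.mp ((hm b).mpr List.mem_cons_self) with h' | h'
              · exact h'.symm
              · exact absurd (h2'.1 a h) (h1'.1 b h').asymm
          subst hab
          congr 1
          apply ih l2 h1'.2 h2'.2
          intro x
          constructor
          · intro hx
            rcases List.mem_cons.mp ((hm x).mp (List.mem_cons_of_mem a hx)) with h | h
            · exact absurd (h ▸ h1'.1 x hx) (lt_irrefl a)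
            · exact h
          · intro hx
            rcases List.mem_cons.mp ((hm x).mpr (List.mem_cons_of_mem a hx)) with h | h
            · exact absurd (h ▸ h2'.1 x hx) (lt_irrefl a)
            · exact h

-- sort-then-adjacent-dedup is the sorted list of the distinct elements
theorem pv_dedupAdj_sorted (xs : List String) :
    pvDedupAdj none (PySem.List.sorted xs (fun x => x))
      = PySem.List.sorted (PySem.Set.ofList xs) (fun x => x) := by
  obtain ⟨hpw, hmem⟩ := pv_dedupAdj_spec (PySem.List.sorted xs (fun x => x)) none
    (by simpa using PySem.List.sorted_pairwise xs (fun x => x))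
    (by intro p hp; simp at hp)
  apply pv_strict_sorted_ext _ _ hpw (PySem.List.sorted_ofList_pairwise_lt xs)
  intro x
  rw [hmem x]
  simp [PySem.List.mem_sorted, PySem.Set.mem_ofList]

-- the channel halves of the two ports agree
theorem pv_channels_eq (monday : List (List (String × Option String))) (q1 : List (List (String × String))) :
    (PySem.List.sorted2
        (q1.foldl (fun d r => match pvS (pvGetQ r "GROUPED_CHANNEL") with
            | some n => d.insert n (pvChannelType n) | none => d)
          (monday.foldl (fun d r => match pvS (pvGetM r "grouped_channel") with
            | some n => d.insert n (pvChannelType n) | none => d) PySem.Dict.empty)).items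
        (fun kv => kv.1) (fun kv => kv.2)).map
      (fun kv => [("name", kv.1), ("channel_type", kv.2)])
    = ((PySem.List.sorted
          (q1.foldl (fun acc r => match pvS (pvGetQ r "GROUPED_CHANNEL") with
              | some n => acc ++ [n] | none => acc)
            (monday.foldl (fun acc r => match pvS (pvGetM r "grouped_channel") with
              | some n => acc ++ [n] | none => acc) [])) (fun x => x)).foldl
        (fun (st : List (List (String × String)) × Option String) n =>
          if some n ≠ st.2 then (st.1 ++ [[("name", n), ("channel_type", pvChannelType n)]], some n) else st)
        ([], none)).1 := by
  set cM := monday.foldl (fun acc r => match pvS (pvGetM r "grouped_channel") with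
      | some n => acc ++ [n] | none => acc) [] with hcM
  set cQ := q1.foldl (fun acc r => match pvS (pvGetQ r "GROUPED_CHANNEL") with
      | some n => acc ++ [n] | none => acc) [] with hcQ
  have hB : q1.foldl (fun acc r => match pvS (pvGetQ r "GROUPED_CHANNEL") with
      | some n => acc ++ [n] | none => acc) cM = cM ++ cQ := by
    rw [hcM, hcQ]
    exact pv_append_fold _
      (by intro acc r; cases pvS (pvGetQ r "GROUPED_CHANNEL") <;> simp) q1 _
  have hA1 : monday.foldl (fun d r => match pvS (pvGetM r "grouped_channel") with
      | some n => d.insert n (pvChannelType n) | none => d) PySem.Dict.empty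
      = cM.foldl (fun d n => d.insert n (pvChannelType n)) PySem.Dict.empty := by
    rw [hcM]
    exact pv_fold_corr _ _ _
      (by intro acc r; cases pvS (pvGetM r "grouped_channel") <;> simp)
      (by intro d r; cases pvS (pvGetM r "grouped_channel") <;> simp) monday PySem.Dict.empty
  have hA2 : q1.foldl (fun d r => match pvS (pvGetQ r "GROUPED_CHANNEL") with
      | some n => d.insert n (pvChannelType n) | none => d)
        (cM.foldl (fun d n => d.insert n (pvChannelType n)) PySem.Dict.empty)
      = cQ.foldl (fun d n => d.insert n (pvChannelType n))
        (cM.foldl (fun d n => d.insert n (pvChannelType n)) PySem.Dict.empty) := by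
    rw [hcQ]
    exact pv_fold_corr _ _ _
      (by intro acc r; cases pvS (pvGetQ r "GROUPED_CHANNEL") <;> simp)
      (by intro d r; cases pvS (pvGetQ r "GROUPED_CHANNEL") <;> simp) q1 _
  rw [hA1, hA2, ← List.foldl_append]
  have hitems : ((cM ++ cQ).foldl (fun d n => d.insert n (pvChannelType n)) PySem.Dict.empty).items
      = (PySem.Set.ofList (cM ++ cQ)).map (fun k => (k, pvChannelType k)) := by
    have h := pv_items_fold_insert pvChannelType (cM ++ cQ) []
    rw [PySem.Set.update_nil_left] at h
    exact h
  rw [hitems, pv_sorted2_map_pair, hB]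
  have hE : ((PySem.List.sorted (cM ++ cQ) (fun x => x)).foldl
        (fun (st : List (List (String × String)) × Option String) n =>
          if some n ≠ st.2 then (st.1 ++ [[("name", n), ("channel_type", pvChannelType n)]], some n) else st)
        ([], none)).1
      = [] ++ (pvDedupAdj none (PySem.List.sorted (cM ++ cQ) (fun x => x))).map
          (fun n => [("name", n), ("channel_type", pvChannelType n)]) :=
    pv_emit_eq (fun n => [("name", n), ("channel_type", pvChannelType n)])
      (PySem.List.sorted (cM ++ cQ) (fun x => x)) none []
  rw [hE, pv_dedupAdj_sorted]
  simp [List.map_map, Function.comp]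

-- the product halves of the two ports agree
theorem pv_products_eq (monday : List (List (String × Option String))) :
    (PySem.List.sorted (monday.foldl (fun s r => match pvS (pvGetM r "product") with
        | some p => PySem.Set.add s (pvProductStoredName p) | none => s) PySem.Set.empty)
        (fun x => x)).map (fun n => [("name", n), ("status", "active")])
    = ((PySem.List.sorted (monday.foldl (fun acc r => match pvS (pvGetM r "product") with
          | some p => acc ++ [pvProductStoredName p] | none => acc) []) (fun x => x)).foldl
        (fun (st : List (List (String × String)) × Option String) p =>
          if some p ≠ st.2 then (st.1 ++ [[("name", p), ("status", "active")]], some p) else st)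
        ([], none)).1 := by
  set pM := monday.foldl (fun acc r => match pvS (pvGetM r "product") with
      | some p => acc ++ [pvProductStoredName p] | none => acc) [] with hpM
  have hA : monday.foldl (fun s r => match pvS (pvGetM r "product") with
      | some p => PySem.Set.add s (pvProductStoredName p) | none => s) PySem.Set.empty
      = PySem.Set.ofList pM := by
    rw [hpM]
    exact pv_fold_corr _ _ _
      (by intro acc r; cases pvS (pvGetM r "product") <;> simp)
      (by intro d r; cases pvS (pvGetM r "product") <;> simp) monday PySem.Set.empty
  have hE : ((PySem.List.sorted pM (fun x => x)).foldl
        (fun (st : List (List (String × String)) × Option String) p =>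
          if some p ≠ st.2 then (st.1 ++ [[("name", p), ("status", "active")]], some p) else st)
        ([], none)).1
      = [] ++ (pvDedupAdj none (PySem.List.sorted pM (fun x => x))).map
          (fun p => [("name", p), ("status", "active")]) :=
    pv_emit_eq (fun p => [("name", p), ("status", "active")])
      (PySem.List.sorted pM (fun x => x)) none []
  rw [hA, hE, pv_dedupAdj_sorted]
  simp

-- ===== VERDICT (by name: the statement is the Claim_ definition above) =====
theorem build_channel_product_rows_py_spec : Claim_equal_build_channel_product_rows_py := by
  intro monday q1 _
  unfold Spec_build_channel_product_rows_py
  exact Prod.ext_iff.mpr ⟨pv_channels_eq monday q1, pv_products_eq monday⟩
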